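-- pv_equiv track=rewrite | github.com/anestisb/oatdump_plus | tools/runtime_memusage/prune_sanitizer_output.py | has_min_lines
-- ===== SOURCE A (Python) =====
-- def has_min_lines(trace, stack_min_size):
--     """Checks if the trace has a minimum amount of levels in trace."""
--     # Line containing 'use-after-poison' contains address accessed, which is
--     # useful for extracting Dex File offsets
--     string_checks = ['use-after-poison', 'READ']
--     required_checks = string_checks + ['#%d ' % line_ctr
--                                        for line_ctr in
--                                        range(stack_min_size)
--                                        ]
--     try:
--         trace_indices = [trace.index(check) for check in required_checks]
--         return all(trace_indices[trace_ind] < trace_indices[trace_ind + 1]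
--                    for trace_ind in range(len(trace_indices) - 1))
--     except ValueError:
--         return False
--     return True
-- ===== SOURCE B (Python) =====
-- def has_min_lines(trace, stack_min_size):
--     """Checks if the trace has a minimum amount of levels in trace."""
--     upos = trace.find('use-after-poison')
--     rpos = trace.find('READ')
--     if upos < 0 or rpos <= upos:
--         return False
--     if stack_min_size <= 0:
--         return True
--     # One pass over the '#' occurrences: first position of every '#<frame> ' token.
--     first = {}
--     j = trace.find('#')
--     while j != -1:
--         k = j + 1
--         while k < len(trace) and trace[k].isdigit():
--             k += 1
--         if j + 1 < k < len(trace) and trace[k] == ' ':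
--             token = trace[j:k + 1]
--             if token not in first:
--                 first[token] = j
--         j = trace.find('#', j + 1)
--     # Frames 0..stack_min_size-1 must all appear, in order, after the READ marker.
--     prev = rpos
--     for frame in range(stack_min_size):
--         pos = first.get('#%d ' % frame)
--         if pos is None or pos <= prev:
--             return False
--         prev = pos
--     return True
-- ===== Notes on version B (the rewrite author's own statement) =====
-- stated objective: faster
-- what changed: A searches the whole trace once per required marker (trace.index for each of 2+stack_min_size patterns) and then compares the index list pairwise; B finds the two literal markers once, makes a single pass over the '#' occurrences of the trace recording the first position of every '#<frame> ' token in a dict, and finally checks frames 0..stack_min_size-1 appear in increasing positions after READ.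
import Mathlib
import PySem

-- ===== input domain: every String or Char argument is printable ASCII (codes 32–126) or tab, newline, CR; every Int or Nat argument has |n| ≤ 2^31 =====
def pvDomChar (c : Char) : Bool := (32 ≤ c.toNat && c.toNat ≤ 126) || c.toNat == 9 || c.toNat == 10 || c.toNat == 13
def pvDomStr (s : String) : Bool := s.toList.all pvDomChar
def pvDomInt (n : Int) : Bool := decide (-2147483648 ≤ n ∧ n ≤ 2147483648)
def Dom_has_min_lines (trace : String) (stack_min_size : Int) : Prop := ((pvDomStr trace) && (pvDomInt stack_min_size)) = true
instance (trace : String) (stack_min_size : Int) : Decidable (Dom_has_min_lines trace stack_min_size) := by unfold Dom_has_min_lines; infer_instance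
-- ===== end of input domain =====

-- B replaces A's one-substring-search-per-marker scan by two literal searches plus a single
-- pass over the '#' occurrences that records the first position of every '#<frame> ' token,
-- then a linear order check over the required frames.

-- ===== PORT A =====
-- required_checks = ['use-after-poison', 'READ'] + ['#%d ' % line_ctr for line_ctr in range(stack_min_size)]
def pvChecksA (stack_min_size : Int) : List (List Char) :=
  ["use-after-poison".toList, "READ".toList] ++
    (PySem.List.pyRange 0 stack_min_size 1).map (fun k => '#' :: (PySem.Int.toChars k ++ [' ']))

-- [trace.index(check) for check in checks]; none = the ValueError a missing check raises
def pvIdxListA (tl : List Char) : List (List Char) → Option (List Int)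
  | [] => some []
  | c :: cs =>
    let f := PySem.Chars.find tl c
    if f = -1 then none
    else (pvIdxListA tl cs).map (fun r => f :: r)

-- all(trace_indices[i] < trace_indices[i + 1] for i in range(len(trace_indices) - 1))
def pvAllIncA : List Int → Bool
  | a :: b :: t => decide (a < b) && pvAllIncA (b :: t)
  | _ => true

def has_min_lines (trace : String) (stack_min_size : Int) : Bool :=
  match pvIdxListA trace.toList (pvChecksA stack_min_size) with
  | none => false          -- except ValueError: return False
  | some idxs => pvAllIncA idxs

-- ===== PORT B =====
-- the body of Source B's '#'-hopping while loop, for one position j (j is a find result ≠ -1, so 0 ≤ j);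
-- the digit-run while loop is ported as takeWhile isdigit on the (j+1)-suffix — exact: it collects
-- precisely the maximal digit run starting at j+1, so k = j+1+len(ds);
-- 'j + 1 < k < len(trace) and trace[k] == " "' is 'ds ≠ [] ∧ tl[k]? = some ' '' (getElem? is none out of range)
def pvStep (tl : List Char) (first : PySem.Dict (List Char) Int) (j : Int) :
    PySem.Dict (List Char) Int :=
  let jn := j.toNat
  let ds := (tl.drop (jn+1)).takeWhile PySem.Chars.isdigit
  let k := jn + 1 + ds.length
  if ds ≠ [] ∧ tl[k]? = some ' ' then
    let token := PySem.List.slice tl (some (jn : Int)) (some ((k : Int) + 1))   -- trace[j:k+1]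
    if (first.get? token).isNone then first.insert token j else first           -- if token not in first: first[token] = j
  else first

-- while j != -1: ...; j = trace.find('#', j + 1)   (fuel = len(trace)+1 suffices: j strictly increases)
def pvScanB (tl : List Char) : Nat → Int → PySem.Dict (List Char) Int → PySem.Dict (List Char) Int
  | 0, _, first => first
  | fuel+1, j, first =>
    if j = -1 then first
    else pvScanB tl fuel (PySem.Chars.findFrom tl ['#'] (j+1)) (pvStep tl first j)

-- for frame in range(stack_min_size): pos = first.get('#%d ' % frame); ...
def pvCheckB (first : PySem.Dict (List Char) Int) (prev : Int) : List Int → Bool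
  | [] => true
  | frame :: rest =>
    match first.get? ('#' :: (PySem.Int.toChars frame ++ [' '])) with
    | none => false                                                 -- pos is None
    | some pos => if pos ≤ prev then false else pvCheckB first pos rest

def has_min_lines_alt (trace : String) (stack_min_size : Int) : Bool :=
  let tl := trace.toList
  let upos := PySem.Chars.find tl "use-after-poison".toList
  let rpos := PySem.Chars.find tl "READ".toList
  if upos < 0 ∨ rpos ≤ upos then false
  else if stack_min_size ≤ 0 then true
  else
    let first := pvScanB tl (tl.length + 1) (PySem.Chars.find tl ['#']) PySem.Dict.empty
    pvCheckB first rpos (PySem.List.pyRange 0 stack_min_size 1)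

-- ===== PRECONDITION & SPEC =====
def Spec_has_min_lines (trace : String) (stack_min_size : Int) (out : Bool) : Prop := out = has_min_lines_alt trace stack_min_size
instance (trace : String) (stack_min_size : Int) (out : Bool) : Decidable (Spec_has_min_lines trace stack_min_size out) := by unfold Spec_has_min_lines; infer_instance

-- ===== CLAIM (what is proved, stated in full; the proofs are below) =====
def Claim_equal_has_min_lines : Prop := ∀ (trace : String) (stack_min_size : Int), Dom_has_min_lines trace stack_min_size → Spec_has_min_lines trace stack_min_size (has_min_lines trace stack_min_size)

-- ===== LEMMAS AND PROOFS =====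
-- decimal representation of a Nat, structurally (≡ Nat.toDigits 10)
def pvRep (n : Nat) : List Char :=
  if _h : n < 10 then [Nat.digitChar n]
  else pvRep (n / 10) ++ [Nat.digitChar (n % 10)]
  decreasing_by exact Nat.div_lt_self (by omega) (by omega)

theorem pvToDigitsCore_eq (fuel : Nat) : ∀ (n : Nat) (acc : List Char), n < fuel →
    Nat.toDigitsCore 10 fuel n acc = pvRep n ++ acc := by
  induction fuel with
  | zero => intro n acc h; omega
  | succ f ih =>
    intro n acc h
    rw [Nat.toDigitsCore]
    by_cases h10 : n < 10
    · have : n / 10 = 0 := Nat.div_eq_of_lt h10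
      simp only [this, reduceIte]
      rw [pvRep, dif_pos h10, Nat.mod_eq_of_lt h10]
      simp
    · have hne : ¬ n / 10 = 0 := by
        intro h0; exact h10 (by omega)
      simp only [if_neg hne]
      rw [ih (n / 10) _ (by omega)]
      conv_rhs => rw [pvRep]
      rw [dif_neg h10]
      simp

theorem pvToChars_eq (k : Int) (h : 0 ≤ k) : PySem.Int.toChars k = pvRep k.toNat := by
  unfold PySem.Int.toChars
  rw [if_neg (by omega)]
  unfold Nat.toDigits
  rw [pvToDigitsCore_eq (k.toNat + 1) k.toNat [] (by omega)]
  simp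

theorem pvDigitChar_isdigit (d : Nat) (h : d < 10) : PySem.Chars.isdigit (Nat.digitChar d) = true := by
  interval_cases d <;> decide

theorem pvRep_digits (n : Nat) : ∀ c ∈ pvRep n, PySem.Chars.isdigit c = true := by
  induction n using Nat.strong_induction_on with
  | _ n ih =>
    rw [pvRep]
    by_cases h : n < 10
    · simp only [dif_pos h, List.mem_singleton]
      rintro c rfl; exact pvDigitChar_isdigit n h
    · simp only [dif_neg h, List.mem_append, List.mem_singleton]
      rintro c (hc | rfl)
      · exact ih (n / 10) (Nat.div_lt_self (by omega) (by omega)) c hc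
      · exact pvDigitChar_isdigit (n % 10) (Nat.mod_lt _ (by omega))

theorem pvRep_ne_nil (n : Nat) : pvRep n ≠ [] := by
  rw [pvRep]; by_cases h : n < 10 <;> simp [h]

-- the canonical '#k ' pattern and the rank-indexed pattern family
def pvPatK (k : Nat) : List Char := '#' :: (pvRep k ++ [' '])

def pvPat : Nat → List Char
  | 0 => "use-after-poison".toList
  | 1 => "READ".toList
  | (k+2) => pvPatK k

-- the required_checks list of A is the pattern family indexed 0 .. 2+m-1, m = stack_min_size.toNat
theorem pvChecksA_eq (smin : Int) :
    pvChecksA smin = (List.range (2 + smin.toNat)).map pvPat := by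
  have h2 : 2 + smin.toNat = (smin.toNat + 1) + 1 := by omega
  rw [h2, List.range_succ_eq_map, List.range_succ_eq_map]
  simp only [List.map_cons, List.map_map]
  unfold pvChecksA
  rw [PySem.List.pyRange_one]
  simp only [Int.sub_zero, List.map_map, List.cons_append, List.nil_append]
  congr 1
  congr 1
  apply List.map_congr_left
  intro k hk
  simp only [Function.comp]
  show '#' :: (PySem.Int.toChars (0 + (k : Int)) ++ [' ']) = pvPat (k + 1 + 1)
  rw [Int.zero_add, pvToChars_eq (k : Int) (by omega)]
  simp [pvPat, pvPatK]

-- stepping the search window one position right when the pattern does not start here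
theorem pvFind_drop_succ (tl : List Char) (i : Nat) (sub : List Char)
    (hnot : ¬ sub <+: tl.drop i) :
    PySem.Chars.find (tl.drop i) sub =
      (if PySem.Chars.find (tl.drop (i+1)) sub = -1 then -1
       else PySem.Chars.find (tl.drop (i+1)) sub + 1) := by
  have hdd : ∀ j : Nat, (tl.drop (i+1)).drop j = (tl.drop i).drop (j+1) := by
    intro j; rw [List.drop_drop, List.drop_drop]; congr 1; omega
  by_cases hb : PySem.Chars.find (tl.drop (i+1)) sub = -1
  · rw [if_pos hb]
    rw [PySem.Chars.find_eq_neg_one_iff] at hb ⊢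
    intro hinf
    rcases (PySem.Chars.exists_prefix_drop_iff_isIn sub (tl.drop i)).mpr
      ((PySem.Chars.isIn_iff_infix sub (tl.drop i)).mpr hinf) with ⟨j, hj⟩
    match j with
    | 0 => exact hnot (by simpa using hj)
    | (j+1) =>
      apply hb
      rw [← PySem.Chars.isIn_iff_infix, ← PySem.Chars.exists_prefix_drop_iff_isIn]
      exact ⟨j, by rw [hdd j]; exact hj⟩
  · rw [if_neg hb]
    have hb0 : 0 ≤ PySem.Chars.find (tl.drop (i+1)) sub := by
      have := PySem.Chars.neg_one_le_find (tl.drop (i+1)) sub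
      omega
    rcases PySem.Chars.find_spec hb0 with ⟨hbpre, hbmin⟩
    set b := PySem.Chars.find (tl.drop (i+1)) sub with hbdef
    have ha0 : 0 ≤ PySem.Chars.find (tl.drop i) sub := by
      rw [PySem.Chars.find_nonneg_iff, ← PySem.Chars.isIn_iff_infix,
        ← PySem.Chars.exists_prefix_drop_iff_isIn]
      exact ⟨b.toNat + 1, by rw [← hdd b.toNat]; exact hbpre⟩
    rcases PySem.Chars.find_spec ha0 with ⟨hapre, hamin⟩
    set a := PySem.Chars.find (tl.drop i) sub with hadef
    have hane : a.toNat ≠ 0 := by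
      intro h0
      exact hnot (by rw [h0] at hapre; simpa using hapre)
    have h1 : ¬ (a.toNat - 1 < b.toNat) := by
      intro hlt
      exact hbmin _ hlt (by rw [hdd]; rw [Nat.sub_add_cancel (by omega)]; exact hapre)
    have h2 : ¬ (b.toNat + 1 < a.toNat) := by
      intro hlt
      exact hamin _ hlt (by rw [← hdd]; exact hbpre)
    omega

-- find pinned down by "occurs here, nowhere earlier"
theorem pvFind_eq_of (s sub : List Char) (v : Nat) (h1 : sub <+: s.drop v)
    (h2 : ∀ i < v, ¬ sub <+: s.drop i) : PySem.Chars.find s sub = (v : Int) := by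
  have hnn : 0 ≤ PySem.Chars.find s sub := by
    rw [PySem.Chars.find_nonneg_iff]
    exact h1.isInfix.trans (List.drop_suffix v s).isInfix
  rcases PySem.Chars.find_spec hnn with ⟨hpre, hmin⟩
  by_cases hlt : (PySem.Chars.find s sub).toNat < v
  · exact absurd hpre (h2 _ hlt)
  · by_cases hgt : v < (PySem.Chars.find s sub).toNat
    · exact absurd h1 (hmin _ hgt)
    · omega

-- the first occurrence (as an absolute position) of sub at or after position s
def pvGF (tl : List Char) (s : Nat) (sub : List Char) : Option Int :=
  if PySem.Chars.find (tl.drop s) sub = -1 then none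
  else some ((s : Int) + PySem.Chars.find (tl.drop s) sub)

theorem pvGF_step (tl : List Char) (s : Nat) (sub : List Char) (h : ¬ sub <+: tl.drop s) :
    pvGF tl s sub = pvGF tl (s+1) sub := by
  unfold pvGF
  rw [pvFind_drop_succ tl s sub h]
  by_cases h1 : PySem.Chars.find (tl.drop (s+1)) sub = -1
  · simp [h1]
  · have hge := PySem.Chars.neg_one_le_find (tl.drop (s+1)) sub
    simp only [if_neg h1]
    rw [if_neg (by omega : ¬ PySem.Chars.find (tl.drop (s+1)) sub + 1 = -1)]
    congr 1
    push_cast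
    ring

theorem pvGF_shift (tl : List Char) (sub : List Char) :
    ∀ (n s : Nat), (∀ i, s ≤ i → i < s + n → ¬ sub <+: tl.drop i) →
      pvGF tl s sub = pvGF tl (s + n) sub := by
  intro n
  induction n with
  | zero => intro s _; rfl
  | succ n ih =>
    intro s h
    rw [pvGF_step tl s sub (h s (le_refl s) (by omega))]
    have := ih (s+1) (fun i h1 h2 => h i (by omega) (by omega))
    rw [this]
    congr 1
    omega

theorem pvHash_prefix_of_patK (kk : Nat) {l : List Char} (h : pvPatK kk <+: l) :
    ['#'] <+: l := by
  rcases h with ⟨t, ht⟩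
  exact ⟨pvRep kk ++ [' '] ++ t, by simpa [pvPatK] using ht⟩

theorem pvTakeWhile_exact (p : Char → Bool) (xs : List Char) (y : Char) (t : List Char)
    (hxs : ∀ x ∈ xs, p x = true) (hy : p y = false) :
    ((xs ++ y :: t).takeWhile p) = xs := by
  induction xs with
  | nil => simp [hy]
  | cons a xs ih =>
    simp only [List.cons_append, List.takeWhile_cons]
    simp [hxs a (by simp), ih (fun x hx => hxs x (by simp [hx]))]

-- the suffix at a '#' position splits as '#', the digit run, the char after it
theorem pvHash_split (tl : List Char) (jn : Nat) (hjn : jn < tl.length) (hH : tl[jn] = '#') :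
    tl.drop jn = '#' :: ((tl.drop (jn+1)).takeWhile PySem.Chars.isdigit ++
      tl.drop (jn + 1 + ((tl.drop (jn+1)).takeWhile PySem.Chars.isdigit).length)) := by
  have h1 : tl.drop jn = tl[jn] :: tl.drop (jn+1) := List.drop_eq_getElem_cons hjn
  rw [h1, hH]
  congr 1
  set ds := (tl.drop (jn+1)).takeWhile PySem.Chars.isdigit with hdsdef
  have hsplit : tl.drop (jn+1) = ds ++ (tl.drop (jn+1)).dropWhile PySem.Chars.isdigit := by
    rw [hdsdef]; exact (List.takeWhile_append_dropWhile).symm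
  have hdw : tl.drop (jn+1+ds.length) = (tl.drop (jn+1)).dropWhile PySem.Chars.isdigit := by
    have h2 : (tl.drop (jn+1)).drop ds.length = tl.drop (jn+1+ds.length) := List.drop_drop
    rw [← h2]
    conv_lhs => rw [hsplit]
    rw [List.drop_left]
  rw [hdw]
  exact hsplit

-- token characterisation at a '#' position: the '#k ' pattern starts at jn iff the
-- digit-run token there is exactly '#k '
theorem pvTok_iff (tl : List Char) (jn : Nat) (hjn : jn < tl.length) (hH : tl[jn] = '#')
    (kk : Nat) :
    (pvPatK kk <+: tl.drop jn) ↔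
      ((tl.drop (jn+1)).takeWhile PySem.Chars.isdigit ≠ [] ∧
       tl[jn + 1 + ((tl.drop (jn+1)).takeWhile PySem.Chars.isdigit).length]? = some ' ' ∧
       '#' :: ((tl.drop (jn+1)).takeWhile PySem.Chars.isdigit ++ [' ']) = pvPatK kk) := by
  set ds := (tl.drop (jn+1)).takeWhile PySem.Chars.isdigit with hdsdef
  have h1 : tl.drop jn = tl[jn] :: tl.drop (jn+1) := List.drop_eq_getElem_cons hjn
  constructor
  · intro hpre
    rcases hpre with ⟨t, ht⟩
    have ht' : tl.drop (jn+1) = pvRep kk ++ ' ' :: t := by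
      rw [h1, hH] at ht
      simp only [pvPatK, List.cons_append, List.append_assoc] at ht
      injection ht with _ h2
      simpa using h2.symm
    have hdseq : ds = pvRep kk := by
      rw [hdsdef, ht']
      exact pvTakeWhile_exact _ _ _ _ (pvRep_digits kk) (by decide)
    have hdw : tl.drop (jn+1+ds.length) = ' ' :: t := by
      have h2 : (tl.drop (jn+1)).drop ds.length = tl.drop (jn+1+ds.length) := List.drop_drop
      rw [← h2, ht', hdseq, List.drop_left]
    refine ⟨by rw [hdseq]; exact pvRep_ne_nil kk, ?_, by rw [hdseq]; rfl⟩
    rw [← List.head?_drop, hdw]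
    rfl
  · rintro ⟨hne, hsp, htok⟩
    have hsplit := pvHash_split tl jn hjn hH
    rw [← hdsdef] at hsplit
    have hcons : ∃ t, tl.drop (jn + 1 + ds.length) = ' ' :: t := by
      rcases hx : tl.drop (jn + 1 + ds.length) with _ | ⟨a, t⟩
      · rw [← List.head?_drop, hx] at hsp; exact absurd hsp (by simp)
      · rw [← List.head?_drop, hx] at hsp
        simp only [List.head?_cons, Option.some.injEq] at hsp
        exact ⟨t, by rw [hsp]⟩
    rcases hcons with ⟨t, ht⟩
    rw [← htok]
    refine ⟨t, ?_⟩
    rw [hsplit, ht]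
    simp

-- the token slice trace[j:k+1] is '#' ++ digit run ++ ' '
theorem pvSlice_tok (tl : List Char) (jn : Nat) (ds t : List Char)
    (h : tl.drop jn = '#' :: (ds ++ ' ' :: t)) :
    PySem.List.slice tl (some ((jn : Nat) : Int)) (some (((jn + 1 + ds.length : Nat) : Int) + 1))
      = '#' :: (ds ++ [' ']) := by
  have hcast : (((jn + 1 + ds.length : Nat) : Int) + 1) = ((jn + 1 + ds.length + 1 : Nat) : Int) := by
    push_cast; ring
  rw [hcast, PySem.List.slice_natCast]
  have harith : jn + 1 + ds.length + 1 - jn = ds.length + 2 := by omega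
  rw [harith, h]
  have h2 : ('#' :: (ds ++ ' ' :: t)) = ('#' :: (ds ++ [' '])) ++ t := by simp
  rw [h2, List.take_append]
  have h3 : ('#' :: (ds ++ [' '])).length = ds.length + 2 := by simp
  rw [List.take_of_length_le (by omega), h3]
  simp

-- one loop-body step, seen through get? of a '#k ' pattern
theorem pvStep_get (tl : List Char) (d : PySem.Dict (List Char) Int) (jn : Nat)
    (hjlt : jn < tl.length) (hH : tl[jn] = '#') (kk : Nat) :
    (pvStep tl d ((jn : Nat) : Int)).get? (pvPatK kk)
      = if pvPatK kk <+: tl.drop jn then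
          (if (d.get? (pvPatK kk)).isNone then some ((jn : Nat) : Int) else d.get? (pvPatK kk))
        else d.get? (pvPatK kk) := by
  unfold pvStep
  simp only [Int.toNat_natCast]
  set ds := (tl.drop (jn+1)).takeWhile PySem.Chars.isdigit with hdsdef
  by_cases hcond : ds ≠ [] ∧ tl[jn + 1 + ds.length]? = some ' '
  · rw [if_pos hcond]
    have hklt : jn + 1 + ds.length < tl.length := by
      rcases List.getElem?_eq_some_iff.mp hcond.2 with ⟨hlt, -⟩
      exact hlt
    have hkc : tl[jn + 1 + ds.length] = ' ' := by
      rcases List.getElem?_eq_some_iff.mp hcond.2 with ⟨hlt, hc⟩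
      exact hc
    have hdecomp : tl.drop jn = '#' :: (ds ++ ' ' :: tl.drop (jn + 1 + ds.length + 1)) := by
      have h1 := pvHash_split tl jn hjlt hH
      rw [← hdsdef] at h1
      have h2 : tl.drop (jn + 1 + ds.length) = tl[jn + 1 + ds.length] :: tl.drop (jn + 1 + ds.length + 1) :=
        List.drop_eq_getElem_cons hklt
      rw [h1, h2, hkc]
    have htokeq := pvSlice_tok tl jn ds (tl.drop (jn + 1 + ds.length + 1)) hdecomp
    rw [htokeq]
    by_cases htok : '#' :: (ds ++ [' ']) = pvPatK kk
    · have hocc : pvPatK kk <+: tl.drop jn :=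
        (pvTok_iff tl jn hjlt hH kk).mpr ⟨hcond.1, hcond.2, htok⟩
      rw [if_pos hocc, htok]
      by_cases hnone : (d.get? (pvPatK kk)).isNone
      · rw [if_pos hnone, if_pos hnone, PySem.Dict.get?_insert_self]
      · rw [if_neg hnone, if_neg hnone]
    · have hocc : ¬ pvPatK kk <+: tl.drop jn := by
        intro hocc
        rcases (pvTok_iff tl jn hjlt hH kk).mp hocc with ⟨-, -, h3⟩
        rw [← hdsdef] at h3
        exact htok h3
      rw [if_neg hocc]
      by_cases hnone : ((d.get? ('#' :: (ds ++ [' ']))).isNone)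
      · rw [if_pos hnone, PySem.Dict.get?_insert, if_neg (fun h => htok h.symm)]
      · rw [if_neg hnone]
  · rw [if_neg hcond]
    have hocc : ¬ pvPatK kk <+: tl.drop jn := by
      intro hocc
      rcases (pvTok_iff tl jn hjlt hH kk).mp hocc with ⟨h1, h2, -⟩
      rw [← hdsdef] at h1 h2
      exact hcond ⟨h1, h2⟩
    rw [if_neg hocc]

-- the scan loop computes, for every '#k ' pattern, its first occurrence at or after s
theorem pvScan_spec (tl : List Char) (kk : Nat) :
    ∀ (fuel s : Nat) (d : PySem.Dict (List Char) Int), s ≤ tl.length → tl.length < fuel + s →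
      (pvScanB tl fuel (PySem.Chars.findFrom tl ['#'] (s : Int)) d).get? (pvPatK kk)
        = (d.get? (pvPatK kk)).or (pvGF tl s (pvPatK kk)) := by
  intro fuel
  induction fuel with
  | zero => intro s d hs hf; exact absurd hf (by omega)
  | succ fuel ih =>
    intro s d hs hf
    rw [PySem.Chars.findFrom_natCast tl ['#'] s hs]
    by_cases h0 : PySem.Chars.find (tl.drop s) ['#'] = -1
    · rw [if_pos h0]
      have hstep : pvScanB tl (fuel+1) (-1) d = d := by rw [pvScanB]; simp
      rw [hstep]
      have hfneg : PySem.Chars.find (tl.drop s) (pvPatK kk) = -1 := by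
        rw [PySem.Chars.find_eq_neg_one_iff]
        intro hinf
        rw [PySem.Chars.find_eq_neg_one_iff] at h0
        apply h0
        rcases (PySem.Chars.exists_prefix_drop_iff_isIn _ _).mpr
          ((PySem.Chars.isIn_iff_infix _ _).mpr hinf) with ⟨i, hi⟩
        exact (pvHash_prefix_of_patK kk hi).isInfix.trans
          (List.drop_suffix i (tl.drop s)).isInfix
      have hnone : pvGF tl s (pvPatK kk) = none := by
        unfold pvGF
        rw [if_pos hfneg]
      rw [hnone, Option.or_none]
    · rw [if_neg h0]
      have hnn : 0 ≤ PySem.Chars.find (tl.drop s) ['#'] := by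
        have := PySem.Chars.neg_one_le_find (tl.drop s) ['#']
        omega
      rcases PySem.Chars.find_spec hnn with ⟨hpre, hmin⟩
      set f0 := PySem.Chars.find (tl.drop s) ['#'] with hf0
      set jn := s + f0.toNat with hjndef
      have hdd : (tl.drop s).drop f0.toNat = tl.drop jn := List.drop_drop
      rw [hdd] at hpre
      have hjlt : jn < tl.length := by
        rcases hpre with ⟨t, ht⟩
        have h1 : (tl.drop jn).length = t.length + 1 := by rw [← ht]; simp
        have h2 : (tl.drop jn).length = tl.length - jn := List.length_drop
        omega
      have hH : tl[jn] = '#' := by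
        rcases hpre with ⟨t, ht⟩
        have h5 : tl.drop jn = tl[jn] :: tl.drop (jn+1) := List.drop_eq_getElem_cons hjlt
        rw [h5] at ht
        simp only [List.singleton_append, List.cons.injEq] at ht
        exact ht.1.symm
      have hjcast : (s : Int) + f0 = ((jn : Nat) : Int) := by
        rw [hjndef]; push_cast; omega
      rw [hjcast]
      have hstep : pvScanB tl (fuel+1) ((jn : Nat) : Int) d =
          pvScanB tl fuel (PySem.Chars.findFrom tl ['#'] (((jn : Nat) : Int) + 1))
            (pvStep tl d ((jn : Nat) : Int)) := by
        rw [pvScanB, if_neg (by omega)]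
      rw [hstep]
      have hcast2 : (((jn : Nat) : Int) + 1) = (((jn + 1 : Nat)) : Int) := by push_cast; ring
      rw [hcast2, ih (jn+1) _ (by omega) (by omega), pvStep_get tl d jn hjlt hH kk]
      -- no '#' — hence no '#k ' pattern — starts in [s, jn)
      have hnope : ∀ i, s ≤ i → i < jn → ¬ pvPatK kk <+: tl.drop i := by
        intro i h1 h2 hp
        have h3 : (tl.drop s).drop (i - s) = tl.drop i := by
          rw [List.drop_drop]; congr 1; omega
        exact hmin (i - s) (by omega) (by rw [h3]; exact pvHash_prefix_of_patK kk hp)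
      by_cases hocc : pvPatK kk <+: tl.drop jn
      · rw [if_pos hocc]
        have hGF : pvGF tl s (pvPatK kk) = some ((jn : Nat) : Int) := by
          unfold pvGF
          have hfeq : PySem.Chars.find (tl.drop s) (pvPatK kk) = (f0.toNat : Int) := by
            apply pvFind_eq_of
            · rw [hdd]; exact hocc
            · intro i hilt
              have h3 : (tl.drop s).drop i = tl.drop (s + i) := List.drop_drop
              rw [h3]
              exact hnope (s + i) (by omega) (by omega)
          rw [hfeq, if_neg (by omega)]
          exact congrArg some (by rw [hjndef]; push_cast; ring)
        by_cases hnone : (d.get? (pvPatK kk)).isNone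
        · rw [if_pos hnone]
          rw [Option.isNone_iff_eq_none] at hnone
          rw [hnone, hGF]
          rfl
        · rw [if_neg hnone]
          rcases hd : d.get? (pvPatK kk) with _ | v
          · rw [hd] at hnone; simp at hnone
          · rfl
      · rw [if_neg hocc]
        have hshift := pvGF_shift tl (pvPatK kk) (jn + 1 - s) s
          (fun i h1 h2 => by
            by_cases hij : i = jn
            · subst hij; exact hocc
            · exact hnope i h1 (by omega))
        rw [show s + (jn + 1 - s) = jn + 1 from by omega] at hshift
        rw [hshift]

-- the final check loop, against the first-occurrence facts
theorem pvCheck_spec (tl : List Char) (first : PySem.Dict (List Char) Int) (m : Nat)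
    (hget : ∀ kk : Nat, first.get? (pvPatK kk) =
      (if PySem.Chars.find tl (pvPatK kk) = -1 then none
       else some (PySem.Chars.find tl (pvPatK kk)))) :
    ∀ (n a : Nat) (prev : Int), a + n = m →
      (pvCheckB first prev (PySem.List.pyRange (a : Int) (m : Int) 1) = true ↔
        ((∀ kk, a ≤ kk → kk < m → PySem.Chars.find tl (pvPatK kk) ≠ -1) ∧
         (∀ kk, a ≤ kk → kk + 1 < m →
            PySem.Chars.find tl (pvPatK kk) < PySem.Chars.find tl (pvPatK (kk+1))) ∧
         (a < m → prev < PySem.Chars.find tl (pvPatK a)))) := by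
  intro n
  induction n with
  | zero =>
    intro a prev hsum
    have ha : a = m := by omega
    subst ha
    rw [PySem.List.pyRange_one_eq_nil (le_refl _)]
    refine iff_of_true rfl ⟨?_, ?_, ?_⟩
    · intro kk h1 h2; exact absurd (h1.trans_lt h2) (lt_irrefl _)
    · intro kk h1 h2; exact absurd h1 (by omega)
    · intro h; exact absurd h (lt_irrefl _)
  | succ n ih =>
    intro a prev hsum
    have ham : a < m := by omega
    rw [PySem.List.pyRange_one_cons (by exact_mod_cast ham)]
    have hkey : ('#' :: (PySem.Int.toChars ((a : Nat) : Int) ++ [' '])) = pvPatK a := by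
      rw [pvToChars_eq _ (Int.natCast_nonneg a), Int.toNat_natCast]
      rfl
    rw [pvCheckB, hkey, hget a]
    by_cases hFa : PySem.Chars.find tl (pvPatK a) = -1
    · rw [if_pos hFa]
      exact iff_of_false (by simp) (fun h => h.1 a (le_refl a) ham hFa)
    · rw [if_neg hFa]
      by_cases hle : PySem.Chars.find tl (pvPatK a) ≤ prev
      · simp only [if_pos hle]
        exact iff_of_false (by simp) (fun h => absurd (h.2.2 ham) (by omega))
      · simp only [if_neg hle]
        have hcast : ((a : Nat) : Int) + 1 = (((a + 1 : Nat)) : Int) := by push_cast; ring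
        rw [hcast, ih (a+1) (PySem.Chars.find tl (pvPatK a)) (by omega)]
        constructor
        · rintro ⟨h1, h2, h3⟩
          refine ⟨?_, ?_, fun _ => by omega⟩
          · intro kk hk1 hk2
            rcases Nat.eq_or_lt_of_le hk1 with rfl | hk1'
            · exact hFa
            · exact h1 kk (by omega) hk2
          · intro kk hk1 hk2
            rcases Nat.eq_or_lt_of_le hk1 with rfl | hk1'
            · exact h3 (by omega)
            · exact h2 kk (by omega) hk2
        · rintro ⟨h1, h2, h3⟩
          refine ⟨fun kk hk1 hk2 => h1 kk (by omega) hk2,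
                  fun kk hk1 hk2 => h2 kk (by omega) hk2,
                  fun h => h2 a (le_refl a) (by omega)⟩

-- ===== A characterised the same way =====
-- first occurrence of pattern r at or after position i (as offset into the i-suffix)
def pvF (tl : List Char) (i r : Nat) : Int := PySem.Chars.find (tl.drop i) (pvPat r)

-- "the patterns e .. 2+m-1 all occur in the i-suffix, with strictly increasing first occurrences"
def pvC (tl : List Char) (m i e : Nat) : Prop :=
  (∀ r, e ≤ r → r < 2 + m → pvF tl i r ≠ -1) ∧
  (∀ r, e ≤ r → r + 1 < 2 + m → pvF tl i r < pvF tl i (r+1))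

theorem pvIdxListA_some (tl : List Char) :
    ∀ l : List (List Char), (∀ p ∈ l, PySem.Chars.find tl p ≠ -1) →
      pvIdxListA tl l = some (l.map (PySem.Chars.find tl)) := by
  intro l
  induction l with
  | nil => intro _; rfl
  | cons c cs ih =>
    intro h
    rw [pvIdxListA]
    simp only [if_neg (h c (by simp))]
    rw [ih (fun p hp => h p (by simp [hp]))]
    rfl

theorem pvIdxListA_none (tl : List Char) :
    ∀ l : List (List Char), (∃ p ∈ l, PySem.Chars.find tl p = -1) →
      pvIdxListA tl l = none := by
  intro l
  induction l with
  | nil => rintro ⟨p, hp, -⟩; simp at hp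
  | cons c cs ih =>
    rintro ⟨p, hp, hf⟩
    rw [pvIdxListA]
    rcases List.mem_cons.mp hp with rfl | hp'
    · simp only [if_pos hf]
    · by_cases hc : PySem.Chars.find tl c = -1
      · simp only [if_pos hc]
      · simp only [if_neg hc, ih ⟨p, hp', hf⟩]
        rfl

theorem pvAllIncA_iff (xs : List Int) : pvAllIncA xs = true ↔ List.IsChain (· < ·) xs := by
  induction xs with
  | nil => exact iff_of_true rfl List.isChain_nil
  | cons a xs ih =>
    cases xs with
    | nil => exact iff_of_true rfl (List.isChain_singleton a)
    | cons b t =>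
      rw [pvAllIncA, Bool.and_eq_true, decide_eq_true_eq, ih, List.isChain_cons_cons]

theorem pvChain_range_iff (f : Nat → Int) (T : Nat) :
    List.IsChain (· < ·) ((List.range T).map f) ↔ ∀ r, r + 1 < T → f r < f (r+1) := by
  rw [List.isChain_map]
  cases T with
  | zero => exact iff_of_true (by simp) (fun r hr => by omega)
  | succ n =>
    rw [List.isChain_range_succ]
    constructor
    · intro h r hr; exact h r (by omega)
    · intro h r hr; exact h r (by omega)

theorem pvA_iff (trace : String) (smin : Int) :
    has_min_lines trace smin = true ↔ pvC trace.toList smin.toNat 0 0 := by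
  unfold has_min_lines
  set tl := trace.toList with htl
  have hdz : ∀ r, pvF tl 0 r = PySem.Chars.find tl (pvPat r) := by
    intro r; rw [pvF, List.drop_zero]
  by_cases hall : ∀ p ∈ pvChecksA smin, PySem.Chars.find tl p ≠ -1
  · rw [pvIdxListA_some tl _ hall]
    dsimp only
    rw [pvAllIncA_iff, pvChecksA_eq, List.map_map, pvChain_range_iff]
    constructor
    · intro hchain
      refine ⟨fun r _ h2 => ?_, fun r _ h2 => ?_⟩
      · rw [hdz]
        apply hall
        rw [pvChecksA_eq]
        exact List.mem_map_of_mem (List.mem_range.mpr h2)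
      · rw [hdz, hdz]; exact hchain r h2
    · intro hC r h2
      have := hC.2 r (Nat.zero_le _) h2
      rwa [hdz, hdz] at this
  · push Not at hall
    rcases hall with ⟨p, hp, hf⟩
    rw [pvIdxListA_none tl _ ⟨p, hp, hf⟩]
    dsimp only
    refine iff_of_false (by simp) ?_
    intro hC
    rw [pvChecksA_eq] at hp
    rcases List.mem_map.mp hp with ⟨r, hr, rfl⟩
    have := hC.1 r (Nat.zero_le _) (List.mem_range.mp hr)
    rw [hdz] at this
    exact this hf

-- ===== VERDICT (by name: the statement is the Claim_ definition above) =====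
theorem has_min_lines_spec : Claim_equal_has_min_lines := by
  intro trace smin _
  show has_min_lines trace smin = has_min_lines_alt trace smin
  unfold has_min_lines_alt
  set tl := trace.toList with htl
  have hAiff := pvA_iff trace smin
  have hdz : ∀ r, pvF tl 0 r = PySem.Chars.find tl (pvPat r) := by
    intro r; rw [pvF, List.drop_zero]
  have hp0 : pvPat 0 = "use-after-poison".toList := rfl
  have hp1 : pvPat 1 = "READ".toList := rfl
  have hgeu := PySem.Chars.neg_one_le_find tl "use-after-poison".toList
  by_cases hbad : PySem.Chars.find tl "use-after-poison".toList < 0 ∨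
      PySem.Chars.find tl "READ".toList ≤ PySem.Chars.find tl "use-after-poison".toList
  · rw [if_pos hbad]
    rcases hA : has_min_lines trace smin with _ | _
    · rfl
    · exfalso
      have hC := hAiff.mp hA
      have h0 := hC.1 0 (by omega) (by omega)
      have h1 := hC.2 0 (by omega) (by omega)
      rw [hdz 0, hp0] at h0 h1
      rw [hdz 1, hp1] at h1
      rcases hbad with hb | hb <;> omega
  · rw [if_neg hbad]
    push Not at hbad
    rcases hbad with ⟨hu, hur⟩
    by_cases hs : smin ≤ 0
    · rw [if_pos hs]
      rw [hAiff]
      have hm : smin.toNat = 0 := by omega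
      rw [hm]
      constructor
      · intro r h1 h2
        interval_cases r
        · rw [hdz 0, hp0]; omega
        · rw [hdz 1, hp1]; omega
      · intro r h1 h2
        have hr0 : r = 0 := by omega
        subst hr0
        rw [hdz 0, hdz 1, hp0, hp1]; omega
    · rw [if_neg hs]
      set m := smin.toNat with hmdef
      have hsmin_eq : smin = (m : Int) := by rw [hmdef]; omega
      have hm1 : 1 ≤ m := by omega
      have hget : ∀ kk : Nat,
          (pvScanB tl (tl.length + 1) (PySem.Chars.find tl ['#']) PySem.Dict.empty).get? (pvPatK kk)
            = (if PySem.Chars.find tl (pvPatK kk) = -1 then none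
               else some (PySem.Chars.find tl (pvPatK kk))) := by
        intro kk
        have h := pvScan_spec tl kk (tl.length + 1) 0 PySem.Dict.empty (by omega) (by omega)
        rw [Nat.cast_zero, PySem.Chars.findFrom_zero] at h
        rw [h, PySem.Dict.get?_empty, Option.none_or]
        unfold pvGF
        rw [List.drop_zero]
        split_ifs
        · rfl
        · rw [Nat.cast_zero, Int.zero_add]
      have hcheck := pvCheck_spec tl _ m hget m 0 (PySem.Chars.find tl "READ".toList) (Nat.zero_add m)
      rw [Nat.cast_zero] at hcheck
      show has_min_lines trace smin =
        pvCheckB (pvScanB tl (tl.length + 1) (PySem.Chars.find tl ['#']) PySem.Dict.empty)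
          (PySem.Chars.find tl "READ".toList) (PySem.List.pyRange 0 smin 1)
      rw [Bool.eq_iff_iff, hAiff, hsmin_eq, hcheck]
      constructor
      · rintro ⟨hC1, hC2⟩
        refine ⟨?_, ?_, ?_⟩
        · intro kk _ hk2
          have := hC1 (kk + 2) (by omega) (by omega)
          rw [hdz] at this
          exact this
        · intro kk _ hk2
          have := hC2 (kk + 2) (by omega) (by omega)
          rw [hdz, hdz] at this
          exact this
        · intro _
          have := hC2 1 (by omega) (by omega)
          rw [hdz, hdz, hp1] at this
          exact this
      · rintro ⟨h1, h2, h3⟩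
        constructor
        · intro r _ hr2
          rw [hdz]
          match r, hr2 with
          | 0, _ => rw [hp0]; omega
          | 1, _ => rw [hp1]; omega
          | (kk+2), hr2 => exact h1 kk (by omega) (by omega)
        · intro r _ hr2
          rw [hdz, hdz]
          match r, hr2 with
          | 0, _ => rw [hp0, hp1]; omega
          | 1, _ => rw [hp1]; exact h3 (by omega)
          | (kk+2), hr2 => exact h2 kk (by omega) (by omega)
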